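-- pv_equiv track=rewrite | github.com/OxRML/MADQA | eval/evaluate.py | derive_hop_type
-- ===== SOURCE A (Python) =====
-- def derive_hop_type(evidence: list) -> str:
--     """Derive hop type from evidence list.
--
--     - single: Single page from a single document
--     - cross_page: Multiple pages from the same document
--     - cross_doc: Pages from different documents
--
--     Args:
--         evidence: List of dicts with 'document' and 'page' keys
--
--     Returns:
--         'single', 'cross_page', or 'cross_doc'
--     """
--     if not evidence:
--         return 'single'
--
--     # Get unique documents and pages
--     documents = set()
--     pages = set()
--
--     for ev in evidence:
--         doc = ev.get('document')
--         page = ev.get('page')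
--         if doc is not None:
--             documents.add(doc)
--         if doc is not None and page is not None:
--             pages.add((doc, page))
--
--     # Determine hop type based on evidence structure
--     if len(documents) > 1:
--         return 'cross_doc'  # Multiple documents
--     elif len(pages) > 1:
--         return 'cross_page'  # Multiple pages from same document
--     else:
--         return 'single'  # Single page
-- ===== SOURCE B (Python) =====
-- def derive_hop_type(evidence: list) -> str:
--     """Single early-exit pass: remember the first document seen and the distinct
--     pages of it; bail out with 'cross_doc' the moment a second document appears."""
--     first_doc = None
--     pages = set()
--     for ev in evidence:
--         doc = ev.get('document')
--         if doc is None: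
--             continue
--         if first_doc is None:
--             first_doc = doc
--         elif doc != first_doc:
--             return 'cross_doc'
--         page = ev.get('page')
--         if page is not None:
--             pages.add(page)
--     return 'cross_page' if len(pages) > 1 else 'single'
-- ===== Notes on version B (the rewrite author's own statement) =====
-- stated objective: alternative
-- what changed: A builds a document set and a (doc,page)-pair set over the whole list and classifies afterwards; B is a single early-exit pass that remembers only the first document and a set of its pages, returning 'cross_doc' the moment a second document appears.
import Mathlib
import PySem

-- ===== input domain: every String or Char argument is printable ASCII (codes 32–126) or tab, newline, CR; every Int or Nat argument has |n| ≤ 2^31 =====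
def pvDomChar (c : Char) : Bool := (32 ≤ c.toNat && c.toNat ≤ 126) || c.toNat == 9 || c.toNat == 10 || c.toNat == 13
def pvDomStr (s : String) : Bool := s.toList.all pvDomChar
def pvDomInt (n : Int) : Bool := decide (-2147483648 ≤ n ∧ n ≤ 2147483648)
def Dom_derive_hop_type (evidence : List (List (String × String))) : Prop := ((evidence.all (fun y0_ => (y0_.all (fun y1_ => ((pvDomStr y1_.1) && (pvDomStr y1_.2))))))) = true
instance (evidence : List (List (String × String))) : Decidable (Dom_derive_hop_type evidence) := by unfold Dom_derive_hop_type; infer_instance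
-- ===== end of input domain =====

-- B changes: one early-exit pass with a first-document marker and a page set, instead of A's
-- build-two-sets-then-classify; equivalence of the return values is proved below (A is total).

-- ===== PORT A =====

-- one iteration of A's for-loop over (documents, pages)
def hopStepA (st : PySem.Set String × PySem.Set (String × String))
    (ev : List (String × String)) : PySem.Set String × PySem.Set (String × String) :=
  let doc := (PySem.Dict.mk ev).get? "document"
  let page := (PySem.Dict.mk ev).get? "page"
  let documents := match doc with
    | some d => PySem.Set.add st.1 d
    | none => st.1
  let pages := match doc, page with
    | some d, some p => PySem.Set.add st.2 (d, p)
    | _, _ => st.2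
  (documents, pages)

def derive_hop_type (evidence : List (List (String × String))) : String :=
  if evidence = [] then "single"
  else
    let st := evidence.foldl hopStepA (PySem.Set.empty, PySem.Set.empty)
    if st.1.length > 1 then "cross_doc"
    else if st.2.length > 1 then "cross_page"
    else "single"

-- ===== PORT B =====

-- B's loop: first_doc is an Option, pages a set of page strings; early return on a second document
def hopLoopB : List (List (String × String)) → Option String → PySem.Set String → String
  | [], _, pages => if pages.length > 1 then "cross_page" else "single"
  | ev :: rest, firstDoc, pages =>
    match (PySem.Dict.mk ev).get? "document" with
    | none => hopLoopB rest firstDoc pages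
    | some doc =>
      match firstDoc with
      | none =>
        hopLoopB rest (some doc)
          (match (PySem.Dict.mk ev).get? "page" with
           | some p => PySem.Set.add pages p
           | none => pages)
      | some fd =>
        if doc ≠ fd then "cross_doc"
        else
          hopLoopB rest (some fd)
            (match (PySem.Dict.mk ev).get? "page" with
             | some p => PySem.Set.add pages p
             | none => pages)

def derive_hop_type_alt (evidence : List (List (String × String))) : String :=
  hopLoopB evidence none PySem.Set.empty

-- ===== PRECONDITION & SPEC =====
def Spec_derive_hop_type (evidence : List (List (String × String))) (out : String) : Prop := out = derive_hop_type_alt evidence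
instance (evidence : List (List (String × String))) (out : String) : Decidable (Spec_derive_hop_type evidence out) := by unfold Spec_derive_hop_type; infer_instance

-- ===== CLAIM (what is proved, stated in full; the proofs are below) =====
def Claim_equal_derive_hop_type : Prop := ∀ (evidence : List (List (String × String))), Dom_derive_hop_type evidence → Spec_derive_hop_type evidence (derive_hop_type evidence)

-- ===== LEMMAS AND PROOFS =====

-- final classification A performs on its fold state
def hopClassify (st : PySem.Set String × PySem.Set (String × String)) : String :=
  if st.1.length > 1 then "cross_doc"
  else if st.2.length > 1 then "cross_page"
  else "single"

theorem hopStepA_docs_len_le (st : PySem.Set String × PySem.Set (String × String))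
    (ev : List (String × String)) : st.1.length ≤ (hopStepA st ev).1.length := by
  simp only [hopStepA]
  cases (PySem.Dict.mk ev).get? "document" with
  | none => simp
  | some d =>
    simp [PySem.Set.add]
    split <;> simp

theorem foldl_docs_len_le (rest : List (List (String × String)))
    (st : PySem.Set String × PySem.Set (String × String)) :
    st.1.length ≤ (rest.foldl hopStepA st).1.length := by
  induction rest generalizing st with
  | nil => simp
  | cons ev rest ih =>
    exact le_trans (hopStepA_docs_len_le st ev) (ih (hopStepA st ev))

theorem add_map_pair (d : String) (pages : PySem.Set String) (p : String) :
    PySem.Set.add (pages.map (fun q => (d, q))) (d, p)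
      = (PySem.Set.add pages p).map (fun q => (d, q)) := by
  have hmem : (d, p) ∈ pages.map (fun q => (d, q)) ↔ p ∈ pages := by simp
  rw [PySem.Set.add_eq_ite, PySem.Set.add_eq_ite]
  by_cases h : p ∈ pages
  · rw [if_pos (hmem.mpr h), if_pos h]
  · rw [if_neg (fun hc => h (hmem.mp hc)), if_neg h]; simp

-- invariant once a first document d has been seen: A's docs set is [d], its pair set is pages tagged with d
theorem loopB_some (rest : List (List (String × String))) (d : String) (pages : PySem.Set String) :
    hopLoopB rest (some d) pages
      = hopClassify (rest.foldl hopStepA ([d], pages.map (fun q => (d, q)))) := by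
  induction rest generalizing pages with
  | nil =>
    simp [hopLoopB, hopClassify]
  | cons ev rest ih =>
    simp only [hopLoopB, List.foldl_cons]
    cases hdoc : (PySem.Dict.mk ev).get? "document" with
    | none =>
      have hst : hopStepA ([d], pages.map (fun q => (d, q))) ev
          = ([d], pages.map (fun q => (d, q))) := by
        simp [hopStepA, hdoc]
      rw [hst]; simpa using ih pages
    | some d' =>
      by_cases hd : d' = d
      · subst hd
        have hadd : PySem.Set.add ([d'] : PySem.Set String) d' = [d'] := by
          simp [PySem.Set.add, PySem.Set.contains]
        cases hpage : (PySem.Dict.mk ev).get? "page" with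
        | none =>
          have hst : hopStepA ([d'], pages.map (fun q => (d', q))) ev
              = ([d'], pages.map (fun q => (d', q))) := by
            simp [hopStepA, hdoc, hpage]
          rw [hst]; simpa using ih pages
        | some p =>
          have hst : hopStepA ([d'], pages.map (fun q => (d', q))) ev
              = ([d'], (PySem.Set.add pages p).map (fun q => (d', q))) := by
            simp [hopStepA, hdoc, hpage, add_map_pair]
          rw [hst]; simpa using ih (PySem.Set.add pages p)
      · -- early exit: A's docs set already has two elements and only grows
        simp only [hdoc, hd, ne_eq, not_false_iff, if_true]
        have hadd : PySem.Set.add ([d] : PySem.Set String) d' = [d, d'] := by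
          simp [PySem.Set.add, PySem.Set.contains, hd]
        have hst : (hopStepA ([d], pages.map (fun q => (d, q))) ev).1 = [d, d'] := by
          simp [hopStepA, hdoc, hadd]
        have h2 := foldl_docs_len_le rest (hopStepA ([d], pages.map (fun q => (d, q))) ev)
        rw [hst] at h2
        simp only [hopClassify]
        rw [if_pos (by simp at h2; omega)]

-- before any document is seen: A's state is still empty
theorem loopB_none (rest : List (List (String × String))) :
    hopLoopB rest none PySem.Set.empty
      = hopClassify (rest.foldl hopStepA (PySem.Set.empty, PySem.Set.empty)) := by
  induction rest with
  | nil => simp [hopLoopB, hopClassify, PySem.Set.empty]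
  | cons ev rest ih =>
    simp only [hopLoopB, List.foldl_cons]
    cases hdoc : (PySem.Dict.mk ev).get? "document" with
    | none => simpa [hopStepA, hdoc] using ih
    | some d =>
      cases hpage : (PySem.Dict.mk ev).get? "page" with
      | none =>
        have := loopB_some rest d PySem.Set.empty
        simpa [hopStepA, hdoc, hpage, PySem.Set.empty, PySem.Set.add, PySem.Set.contains] using this
      | some p =>
        have := loopB_some rest d (PySem.Set.add PySem.Set.empty p)
        simpa [hopStepA, hdoc, hpage, PySem.Set.empty, PySem.Set.add, PySem.Set.contains] using this

-- ===== VERDICT (by name: the statement is the Claim_ definition above) =====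
theorem derive_hop_type_spec : Claim_equal_derive_hop_type := by
  intro evidence _
  unfold Spec_derive_hop_type derive_hop_type derive_hop_type_alt
  rw [loopB_none evidence]
  cases evidence with
  | nil => simp [hopClassify, PySem.Set.empty]
  | cons ev rest => simp [hopClassify]
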